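-- pv_equiv track=rewrite | github.com/abirbhattacharya82/Secret-Code | Encoder.py | encode_sent
-- ===== SOURCE A (Python) =====
-- def encode(s):
--     t=""
--     if len(s)%2!=0:
--         t="QQ"+s[::-1]+"QQ"
--     else:
--         t=s[len(s)//2:]+s[:len(s)//2]
--     return t
--
-- def encode_sent(s):
--     t=""
--     s=s+" "
--     word=""
--     for i in s:
--         if i!=' ' and i!=',' and i!='.' and i!='!':
--             word=word+i
--         else:
--             t=t+encode(word)+i
--             word=""
--     return t
-- ===== SOURCE B (Python) =====
-- import re
--
-- def encode(s):
--     t = ""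
--     if len(s) % 2 != 0:
--         t = "QQ" + s[::-1] + "QQ"
--     else:
--         t = s[len(s)//2:] + s[:len(s)//2]
--     return t
--
-- def encode_sent(s):
--     return "".join(encode(w) + d
--                    for w, d in re.findall(r'([^ ,.!]*)([ ,.!])', s + " "))
-- ===== Notes on version B (the rewrite author's own statement) =====
-- stated objective: faster
-- what changed: encode_sent no longer scans characters with a word accumulator and flush-on-delimiter state; it tokenizes the whole string (plus the trailing space) into (word, delimiter) pairs with one regex findall and joins encode(word)+delim over the pairs.
import Mathlib
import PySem

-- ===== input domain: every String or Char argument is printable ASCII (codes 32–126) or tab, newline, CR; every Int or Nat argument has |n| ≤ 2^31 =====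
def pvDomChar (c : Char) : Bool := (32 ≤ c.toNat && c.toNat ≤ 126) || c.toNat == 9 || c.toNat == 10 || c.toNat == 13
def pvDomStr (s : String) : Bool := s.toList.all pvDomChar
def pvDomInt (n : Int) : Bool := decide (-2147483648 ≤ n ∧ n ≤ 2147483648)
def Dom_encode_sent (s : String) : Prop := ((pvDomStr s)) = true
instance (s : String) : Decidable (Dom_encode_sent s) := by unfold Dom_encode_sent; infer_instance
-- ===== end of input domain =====

-- B replaces A's char-by-char accumulator loop by a (word, delimiter) tokenization of the
-- whole string (regex findall in Python), mapping encode over the tokens and joining;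
-- objective: one regex-style tokenization pass and a single join instead of repeated string concatenation (measured faster).

-- ===== PORT A =====
-- the shared helper `encode` (textually identical in Source A and Source B)
def pyEncode (s : String) : String :=
  if s.length % 2 ≠ 0 then
    "QQ" ++ String.ofList s.toList.reverse ++ "QQ"   -- s[::-1]
  else  -- s[len(s)//2:] + s[:len(s)//2]
    String.ofList (s.toList.drop (s.length / 2)) ++ String.ofList (s.toList.take (s.length / 2))

-- the `for i in s` loop of A, with its state (t, word)
def encodeSentLoop : List Char → String → String → String
  | [], t, _ => t
  | c :: cs, t, word =>
    if c ≠ ' ' ∧ c ≠ ',' ∧ c ≠ '.' ∧ c ≠ '!' then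
      encodeSentLoop cs t (word.push c)
    else
      encodeSentLoop cs (t ++ pyEncode word ++ c.toString) ""

def encode_sent (s : String) : String := encodeSentLoop (s ++ " ").toList "" ""

-- ===== PORT B =====
def isDelimB (c : Char) : Bool := c == ' ' || c == ',' || c == '.' || c == '!'

-- re.findall(r'([^ ,.!]*)([ ,.!])', s): the list of (word, delimiter) matches
def tokensB : List Char → List (List Char × Char)
  | [] => []
  | c :: cs =>
    if isDelimB c then ([], c) :: tokensB cs
    else
      match tokensB cs with
      | [] => []                      -- trailing chars with no delimiter: no match
      | (w, d) :: ts => (c :: w, d) :: ts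

def encode_sent_alt (s : String) : String :=
  String.join ((tokensB (s ++ " ").toList).map
    (fun p => pyEncode (String.ofList p.1) ++ p.2.toString))

-- ===== PRECONDITION & SPEC =====
def Spec_encode_sent (s : String) (out : String) : Prop := out = encode_sent_alt s
instance (s : String) (out : String) : Decidable (Spec_encode_sent s out) := by unfold Spec_encode_sent; infer_instance

-- ===== CLAIM (what is proved, stated in full; the proofs are below) =====
def Claim_equal_encode_sent : Prop := ∀ (s : String), Dom_encode_sent s → Spec_encode_sent s (encode_sent s)

-- ===== LEMMAS AND PROOFS =====

theorem pvFoldlApp (l : List String) : ∀ a : String,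
    List.foldl (fun r s => r ++ s) a l = a ++ List.foldl (fun r s => r ++ s) "" l := by
  induction l with
  | nil => intro a; simp
  | cons x l ih =>
    intro a
    simp only [List.foldl_cons]
    rw [ih (a ++ x), ih (("" : String) ++ x)]
    simp [String.append_assoc]

theorem pvJoinCons (a : String) (l : List String) : String.join (a :: l) = a ++ String.join l := by
  simp only [String.join, List.foldl_cons]
  rw [pvFoldlApp]
  simp

-- prepending a delimiter-free word to the input prepends it to the first token
theorem tokensB_word_prefix (w cs : List Char) (h : ∀ x ∈ w, isDelimB x = false) :
    tokensB (w ++ cs) =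
      match tokensB cs with
      | [] => []
      | (w2, d) :: ts => (w ++ w2, d) :: ts := by
  induction w with
  | nil =>
    simp
    cases tokensB cs with
    | nil => rfl
    | cons p ts => cases p; rfl
  | cons c w ih =>
    have hc : isDelimB c = false := h c (by simp)
    have hw : ∀ x ∈ w, isDelimB x = false := fun x hx => h x (by simp [hx])
    simp only [List.cons_append, tokensB, hc, Bool.false_eq_true, if_false, ih hw]
    cases tokensB cs with
    | nil => rfl
    | cons p ts => cases p; rfl

theorem cond_iff_not_delim (c : Char) :
    (c ≠ ' ' ∧ c ≠ ',' ∧ c ≠ '.' ∧ c ≠ '!') ↔ isDelimB c = false := by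
  simp [isDelimB, and_assoc]

theorem push_ofList (w : List Char) (c : Char) :
    (String.ofList w).push c = String.ofList (w ++ [c]) := by
  rw [String.ofList_append, ← String.append_singleton]
  rfl

theorem loop_render (cs : List Char) : ∀ (t : String) (w : List Char),
    (∀ x ∈ w, isDelimB x = false) →
    encodeSentLoop cs t (String.ofList w) =
      t ++ String.join ((tokensB (w ++ cs)).map
        (fun p => pyEncode (String.ofList p.1) ++ p.2.toString)) := by
  induction cs with
  | nil =>
    intro t w h
    rw [tokensB_word_prefix w [] h]
    simp [encodeSentLoop, tokensB, String.join]
  | cons c cs ih =>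
    intro t w h
    by_cases hc : c ≠ ' ' ∧ c ≠ ',' ∧ c ≠ '.' ∧ c ≠ '!'
    · have hcd : isDelimB c = false := (cond_iff_not_delim c).1 hc
      have hw : ∀ x ∈ w ++ [c], isDelimB x = false := by
        intro x hx
        rcases List.mem_append.1 hx with hx | hx
        · exact h x hx
        · simp at hx; subst hx; exact hcd
      simp only [encodeSentLoop]
      rw [if_pos hc, push_ofList, ih t (w ++ [c]) hw]
      simp [List.append_assoc]
    · have hcd : isDelimB c = true := by
        by_contra hh
        exact hc ((cond_iff_not_delim c).2 (Bool.not_eq_true _ ▸ hh))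
      simp only [encodeSentLoop]
      rw [if_neg hc]
      have hrec := ih (t ++ pyEncode (String.ofList w) ++ c.toString) [] (by simp)
      simp only [List.nil_append] at hrec
      rw [show ("" : String) = String.ofList [] from rfl, hrec]
      rw [tokensB_word_prefix w (c :: cs) h]
      simp only [tokensB, hcd, if_true, List.map_cons, pvJoinCons]
      simp only [String.append_assoc, List.append_nil]

-- ===== VERDICT (by name: the statement is the Claim_ definition above) =====
theorem encode_sent_spec : Claim_equal_encode_sent := by
  intro s _
  unfold Spec_encode_sent encode_sent encode_sent_alt
  have h := loop_render (s ++ " ").toList "" [] (by simp)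
  simpa using h
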